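-- pv_equiv track=rewrite | github.com/yhinai/contributorAI | ai_contributor_summaries/friendli_ai_profiler.py | _assess_activity_level
-- ===== SOURCE A (Python) =====
-- from typing import Dict, List, Optional, Any
--
-- def _assess_activity_level(contributions_data: List[Dict]) -> str:
--     """Assess activity level."""
--     if not contributions_data:
--         return "inactive"
--
--     total_contributions = sum(contrib.get("contribution_count", 0) for contrib in contributions_data)
--     repo_count = len(contributions_data)
--
--     if total_contributions > 200 and repo_count > 10:
--         return "very_active"
--     elif total_contributions > 100 and repo_count > 5:
--         return "active"
--     elif total_contributions > 50 and repo_count > 3: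
--         return "moderately_active"
--     else:
--         return "occasional"
-- ===== SOURCE B (Python) =====
-- def _assess_activity_level(contributions_data):
--     """Assess activity level."""
--     if not contributions_data:
--         return "inactive"
--
--     total = 0
--     repos = 0
--     for contrib in contributions_data:
--         total += contrib.get("contribution_count", 0)
--         repos += 1
--
--     # The cascade's conditions are nested, so the chosen branch is the minimum
--     # of how many total-thresholds and repo-thresholds are strictly exceeded.
--     t_tier = sum(1 for th in (50, 100, 200) if total > th)
--     r_tier = sum(1 for th in (3, 5, 10) if repos > th)
--     return ("occasional", "moderately_active", "active", "very_active")[min(t_tier, r_tier)]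
-- ===== Notes on version B (the rewrite author's own statement) =====
-- stated objective: alternative
-- what changed: Single accumulator pass over the data replaces sum()+len(), and the if/elif cascade is replaced by an arithmetic tier computation: count thresholds strictly exceeded by total and by repo count, then index a label table by the minimum of the two tiers (valid because the cascade's conditions are nested).
import Mathlib
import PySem

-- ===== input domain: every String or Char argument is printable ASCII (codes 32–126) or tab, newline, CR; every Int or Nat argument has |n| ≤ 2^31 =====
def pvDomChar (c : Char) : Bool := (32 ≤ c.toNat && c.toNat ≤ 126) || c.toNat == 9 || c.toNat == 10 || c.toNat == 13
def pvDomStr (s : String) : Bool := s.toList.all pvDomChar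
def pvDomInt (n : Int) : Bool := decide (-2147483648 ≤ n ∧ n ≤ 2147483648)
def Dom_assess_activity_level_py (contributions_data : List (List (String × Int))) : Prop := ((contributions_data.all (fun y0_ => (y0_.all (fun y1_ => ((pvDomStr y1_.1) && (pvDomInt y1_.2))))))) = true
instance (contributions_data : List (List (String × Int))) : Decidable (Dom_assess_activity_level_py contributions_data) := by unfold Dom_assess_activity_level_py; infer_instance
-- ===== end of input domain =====

-- B: one accumulator pass builds (total, repos); the if/elif cascade becomes indexing a label table by the minimum of two threshold-tier counts (same values everywhere).


-- ===== PORT A =====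
def assess_activity_level_py (contributions_data : List (List (String × Int))) : String :=
  if contributions_data = [] then "inactive"
  else
    let total_contributions : Int :=
      (contributions_data.map (fun contrib => PySem.Dict.getD (PySem.Dict.mk contrib) "contribution_count" 0)).sum
    let repo_count : Int := contributions_data.length
    if total_contributions > 200 ∧ repo_count > 10 then "very_active"
    else if total_contributions > 100 ∧ repo_count > 5 then "active"
    else if total_contributions > 50 ∧ repo_count > 3 then "moderately_active"
    else "occasional"

-- ===== PORT B =====
-- single pass accumulating (total, repos), as Source B's for-loop
def pvAccum (contributions_data : List (List (String × Int))) : Int × Int :=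
  contributions_data.foldl
    (fun acc contrib => (acc.1 + PySem.Dict.getD (PySem.Dict.mk contrib) "contribution_count" 0, acc.2 + 1))
    (0, 0)

-- sum(1 for th in ths if v > th)
def pvTier (v : Int) (ths : List Int) : Int :=
  (ths.map (fun th => if v > th then (1 : Int) else 0)).sum

def assess_activity_level_py_alt (contributions_data : List (List (String × Int))) : String :=
  if contributions_data = [] then "inactive"
  else
    let acc := pvAccum contributions_data
    let t_tier := pvTier acc.1 [50, 100, 200]
    let r_tier := pvTier acc.2 [3, 5, 10]
    -- tuple indexing: index is provably in range (0..3); none is unreachable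
    (PySem.List.pyGet? ["occasional", "moderately_active", "active", "very_active"] (min t_tier r_tier)).getD ""

-- ===== PRECONDITION & SPEC =====
def Spec_assess_activity_level_py (contributions_data : List (List (String × Int))) (out : String) : Prop := out = assess_activity_level_py_alt contributions_data
instance (contributions_data : List (List (String × Int))) (out : String) : Decidable (Spec_assess_activity_level_py contributions_data out) := by unfold Spec_assess_activity_level_py; infer_instance

-- ===== CLAIM (what is proved, stated in full; the proofs are below) =====
def Claim_equal_assess_activity_level_py : Prop := ∀ (contributions_data : List (List (String × Int))), Dom_assess_activity_level_py contributions_data → Spec_assess_activity_level_py contributions_data (assess_activity_level_py contributions_data)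

-- ===== LEMMAS AND PROOFS =====
theorem pvAccum_eq (l : List (List (String × Int))) :
    pvAccum l = ((l.map (fun contrib => PySem.Dict.getD (PySem.Dict.mk contrib) "contribution_count" 0)).sum, (l.length : Int)) := by
  unfold pvAccum
  suffices h : ∀ (a b : Int), l.foldl
      (fun acc contrib => (acc.1 + PySem.Dict.getD (PySem.Dict.mk contrib) "contribution_count" 0, acc.2 + 1)) (a, b)
      = (a + (l.map (fun contrib => PySem.Dict.getD (PySem.Dict.mk contrib) "contribution_count" 0)).sum, b + l.length) by
    simpa using h 0 0
  induction l with
  | nil => intro a b; simp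
  | cons x xs ih =>
    intro a b
    simp [List.foldl, ih, List.sum_cons]
    constructor <;> ring

theorem classify_eq (total repos : Int) :
    (if total > 200 ∧ repos > 10 then "very_active"
     else if total > 100 ∧ repos > 5 then "active"
     else if total > 50 ∧ repos > 3 then "moderately_active"
     else "occasional")
    = (PySem.List.pyGet? ["occasional", "moderately_active", "active", "very_active"]
        (min (pvTier total [50, 100, 200]) (pvTier repos [3, 5, 10]))).getD "" := by
  have et : pvTier total [50, 100, 200]
      = (if total > 50 then (1:Int) else 0) + ((if total > 100 then (1:Int) else 0) + (if total > 200 then (1:Int) else 0)) := by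
    simp [pvTier]
  have er : pvTier repos [3, 5, 10]
      = (if repos > 3 then (1:Int) else 0) + ((if repos > 5 then (1:Int) else 0) + (if repos > 10 then (1:Int) else 0)) := by
    simp [pvTier]
  rw [et, er]
  split_ifs <;> first | decide | omega

-- ===== VERDICT (by name: the statement is the Claim_ definition above) =====
theorem assess_activity_level_py_spec : Claim_equal_assess_activity_level_py := by
  intro contributions_data _
  unfold Spec_assess_activity_level_py assess_activity_level_py assess_activity_level_py_alt
  by_cases h : contributions_data = []
  · simp [h]
  · simp only [h, if_false, pvAccum_eq]
    exact classify_eq _ _
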